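-- pv_equiv track=rewrite | github.com/hamb0n-3/CyberLLMInstruct | dataset_creation/10_format_dataset.py | _clean_spacing
-- ===== SOURCE A (Python) =====
-- def _clean_spacing(text: str) -> str:
--     """Clean up excessive blank lines and trailing spaces"""
--     # Remove trailing whitespace from each line
--     lines = [line.rstrip() for line in text.split('\n')]
--
--     # Remove excessive blank lines (max 2 consecutive)
--     cleaned_lines = []
--     blank_count = 0
--
--     for line in lines:
--         if not line:
--             blank_count += 1
--             if blank_count <= 2:
--                 cleaned_lines.append(line)
--         else:
--             blank_count = 0
--             cleaned_lines.append(line)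
--
--     # Remove leading and trailing blank lines
--     while cleaned_lines and not cleaned_lines[0]:
--         cleaned_lines.pop(0)
--     while cleaned_lines and not cleaned_lines[-1]:
--         cleaned_lines.pop()
--
--     return '\n'.join(cleaned_lines)
-- ===== SOURCE B (Python) =====
-- def _clean_spacing(text: str) -> str:
--     """Clean up excessive blank lines and trailing spaces"""
--     lines = [line.rstrip() for line in text.split('\n')]
--     # keep a blank line only if it is not preceded by two blank lines;
--     # leading/trailing blank lines become leading/trailing newlines of the
--     # join and are stripped off at the end
--     kept = [ln for k, ln in enumerate(lines)
--             if ln or k < 2 or lines[k - 1] or lines[k - 2]]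
--     return '\n'.join(kept).strip('\n')
-- ===== Notes on version B (the rewrite author's own statement) =====
-- stated objective: idiomatic
-- what changed: Replaces the stateful blank_count scan and the two while/pop trimming loops by a stateless look-back-two filter over enumerate(lines) followed by a single join-and-strip of newline characters that drops the leading/trailing blank lines.
import Mathlib
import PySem

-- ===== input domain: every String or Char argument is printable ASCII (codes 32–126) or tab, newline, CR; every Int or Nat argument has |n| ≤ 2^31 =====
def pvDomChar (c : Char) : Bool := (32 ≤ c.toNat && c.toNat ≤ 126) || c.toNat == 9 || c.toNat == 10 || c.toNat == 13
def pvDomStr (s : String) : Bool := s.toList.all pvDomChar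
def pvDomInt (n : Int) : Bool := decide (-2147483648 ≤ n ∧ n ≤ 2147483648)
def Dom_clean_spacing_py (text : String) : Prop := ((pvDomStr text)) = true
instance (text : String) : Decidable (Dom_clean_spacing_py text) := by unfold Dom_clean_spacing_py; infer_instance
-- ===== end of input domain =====

-- B replaces A's stateful blank_count scan and two while/pop trims by a stateless
-- look-back-two filter plus '\n'.join(...).strip('\n'); same return value, same cost.

-- ===== PORT A =====
-- the trailing 'while cleaned_lines and not cleaned_lines[-1]: cleaned_lines.pop()'
def pvPopTrailingBlanks : List String → List String
  | [] => []
  | x :: xs =>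
    if (x :: xs).getLast (by simp) = "" then pvPopTrailingBlanks (x :: xs).dropLast
    else x :: xs
  termination_by l => l.length
  decreasing_by simp

def clean_spacing_py (text : String) : String :=
  -- text.split('\n') never raises ('\n' ≠ ''), so split? is always some
  let lines := ((PySem.Str.split? text "\n").getD []).map PySem.Str.rstrip
  let cleaned := lines.foldl
    (fun (st : Int × List String) line =>
      if line = "" then
        let bc := st.1 + 1
        (bc, if bc ≤ 2 then st.2 ++ [line] else st.2)
      else (0, st.2 ++ [line]))
    ((0 : Int), ([] : List String))
  -- 'while cleaned_lines and not cleaned_lines[0]: cleaned_lines.pop(0)'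
  let trimmed := pvPopTrailingBlanks (cleaned.2.dropWhile (· == ""))
  PySem.Str.join "\n" trimmed

-- ===== PORT B =====
def clean_spacing_py_alt (text : String) : String :=
  let lines := ((PySem.Str.split? text "\n").getD []).map PySem.Str.rstrip
  let kept := (PySem.List.enumerate lines).filterMap
    (fun p =>
      if p.2 != "" || decide (p.1 < 2) || PySem.List.pyGetD lines (p.1 - 1) "" != ""
          || PySem.List.pyGetD lines (p.1 - 2) "" != "" then
        some p.2
      else none)
  PySem.Str.stripChars (PySem.Str.join "\n" kept) "\n"

-- ===== PRECONDITION & SPEC =====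
def Spec_clean_spacing_py (text : String) (out : String) : Prop := out = clean_spacing_py_alt text
instance (text : String) (out : String) : Decidable (Spec_clean_spacing_py text out) := by unfold Spec_clean_spacing_py; infer_instance

-- ===== CLAIM (what is proved, stated in full; the proofs are below) =====
def Claim_equal_clean_spacing_py : Prop := ∀ (text : String), Dom_clean_spacing_py text → Spec_clean_spacing_py text (clean_spacing_py text)

-- ===== LEMMAS AND PROOFS =====

-- the common "keep at most two consecutive blank lines" pass, written as a
-- window recursion carrying the previous two lines (sentinel "x" = non-blank)
def pvCollapse (p2 p1 : String) : List String → List String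
  | [] => []
  | x :: xs => (if x ≠ "" ∨ p1 ≠ "" ∨ p2 ≠ "" then [x] else []) ++ pvCollapse p1 x xs

-- the line preceding position k by j, with non-blank sentinel before the start
def pvPrev (lines : List String) (k j : Nat) : String :=
  if j ≤ k then lines.getD (k - j) "" else "x"

theorem pvMem_pvCollapse {x : String} {p2 p1 : String} {L : List String}
    (h : x ∈ pvCollapse p2 p1 L) : x ∈ L := by
  induction L generalizing p2 p1 with
  | nil => simp [pvCollapse] at h
  | cons a as ih =>
    simp only [pvCollapse, List.mem_append] at h
    rcases h with h | h
    · split at h <;> simp_all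
    · exact List.mem_cons_of_mem _ (ih h)

theorem pvFoldA (suf : List String) : ∀ (bc : Int) (acc : List String) (p1 p2 : String),
    (p1 ≠ "" → bc = 0) → (p1 = "" → p2 ≠ "" → bc = 1) → (p1 = "" → p2 = "" → 2 ≤ bc) →
    (suf.foldl
      (fun (st : Int × List String) line =>
        if line = "" then (st.1 + 1, if st.1 + 1 ≤ 2 then st.2 ++ [line] else st.2)
        else (0, st.2 ++ [line]))
      (bc, acc)).2 = acc ++ pvCollapse p2 p1 suf := by
  induction suf with
  | nil => intro bc acc p1 p2 _ _ _; simp [pvCollapse]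
  | cons x xs ih =>
    intro bc acc p1 p2 h0 h1 h2
    by_cases hx : x = ""
    · subst hx
      simp only [List.foldl_cons]
      rw [pvCollapse]
      by_cases hp1 : p1 = ""
      · by_cases hp2 : p2 = ""
        · have hb := h2 hp1 hp2
          rw [if_neg (show ¬(bc + 1 ≤ 2) by omega)]
          simp only [if_true]
          rw [ih (bc+1) acc "" p1 (by simp) (by simp [hp1]) (fun _ _ => by omega)]
          simp [hp1, hp2]
        · have hb := h1 hp1 hp2
          rw [if_pos (show bc + 1 ≤ 2 by omega)]
          simp only [if_true]
          rw [ih (bc+1) (acc ++ [""]) "" p1 (by simp) (by simp [hp1]) (fun _ _ => by omega)]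
          simp [hp1, hp2]
      · have hb := h0 hp1
        rw [if_pos (show bc + 1 ≤ 2 by omega)]
        simp only [if_true]
        rw [ih (bc+1) (acc ++ [""]) "" p1 (by simp) (fun _ _ => by omega) (fun _ h => absurd h hp1)]
        simp [hp1]
    · simp only [List.foldl_cons, if_neg hx]
      rw [pvCollapse]
      rw [ih 0 (acc ++ [x]) x p1 (fun _ => rfl) (fun h _ => absurd h hx) (fun h _ => absurd h hx)]
      simp [hx]

theorem pvFilterB (lines : List String) : ∀ (suf pre : List String), lines = pre ++ suf →
    (PySem.List.enumerate suf (pre.length : Int)).filterMap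
      (fun p =>
        if p.2 != "" || decide (p.1 < 2) || PySem.List.pyGetD lines (p.1 - 1) "" != ""
            || PySem.List.pyGetD lines (p.1 - 2) "" != "" then
          some p.2
        else none)
    = pvCollapse (pvPrev lines pre.length 2) (pvPrev lines pre.length 1) suf := by
  intro suf
  induction suf with
  | nil => intro pre _; simp [PySem.List.enumerate, pvCollapse]
  | cons x xs ih =>
    intro pre hpre
    rw [PySem.List.enumerate_cons, List.filterMap_cons]
    set k := pre.length with hk
    have hxk : lines[k]?.getD "" = x := by
      subst hpre
      rw [hk, List.getElem?_append_right (le_refl _)]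
      simp
    have hcond : (x != "" || decide ((k : Int) < 2)
          || PySem.List.pyGetD lines ((k : Int) - 1) "" != ""
          || PySem.List.pyGetD lines ((k : Int) - 2) "" != "") = true
        ↔ (x ≠ "" ∨ pvPrev lines k 1 ≠ "" ∨ pvPrev lines k 2 ≠ "") := by
      match k with
      | 0 => simp [pvPrev]
      | 1 => simp [pvPrev]
      | (m+2) =>
        have h1 : ((m+2 : Nat) : Int) - 1 = ((m+1 : Nat) : Int) := by push_cast; ring
        have h2 : ((m+2 : Nat) : Int) - 2 = ((m : Nat) : Int) := by push_cast; ring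
        rw [h1, h2, PySem.List.pyGetD_natCast, PySem.List.pyGetD_natCast]
        simp [pvPrev]
        have hnl : ¬((m : Int) + 2 ≤ 1) := by omega
        tauto
    have hrec := ih (pre ++ [x]) (by simp [hpre, List.append_assoc])
    have hp1 : pvPrev lines (k+1) 1 = x := by simp [pvPrev, hxk]
    have hp2 : pvPrev lines (k+1) 2 = pvPrev lines k 1 := by
      match k with
      | 0 => simp [pvPrev]
      | (m+1) => simp [pvPrev]
    rw [List.length_append, List.length_singleton, ← hk, Nat.cast_add, Nat.cast_one, hp1, hp2] at hrec
    rw [pvCollapse, hrec]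
    by_cases hc : (x != "" || decide ((k : Int) < 2)
          || PySem.List.pyGetD lines ((k : Int) - 1) "" != ""
          || PySem.List.pyGetD lines ((k : Int) - 2) "" != "") = true
    · rw [if_pos hc, if_pos (hcond.mp hc)]
      simp
    · rw [if_neg hc, if_neg (fun h => hc (hcond.mpr h))]
      simp

theorem pvSplitGo_nl (fuel : Nat) : ∀ (l cur : List Char) (acc : List (List Char)),
    l.length < fuel → (∀ p ∈ acc, '\n' ∉ p) → '\n' ∉ cur →
    ∀ p ∈ PySem.Chars.splitOn.go ['\n'] fuel l cur acc, '\n' ∉ p := by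
  induction fuel with
  | zero => intro l cur acc h; omega
  | succ fuel ih =>
    intro l cur acc hlen hacc hcur
    cases l with
    | nil =>
      rw [PySem.Chars.splitOn.go]
      · intro p hp
        simp only [List.mem_reverse, List.mem_cons] at hp
        rcases hp with h | h
        · subst h; simpa using hcur
        · exact hacc _ h
      · omega
    | cons c rest =>
      rw [PySem.Chars.splitOn.go]
      by_cases hpre : List.isPrefixOf ['\n'] (c :: rest) = true
      · rw [if_pos hpre]
        refine ih _ [] _ (by simp at hlen ⊢; omega) ?_ (by simp)
        intro p hp
        rcases List.mem_cons.mp hp with h | h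
        · subst h; simpa using hcur
        · exact hacc _ h
      · rw [if_neg hpre]
        have hc : c ≠ '\n' := by
          intro h; subst h
          simp [List.isPrefixOf] at hpre
        refine ih _ _ _ (by simpa using hlen) hacc ?_
        intro h
        rcases List.mem_cons.mp h with h | h
        · exact hc h.symm
        · exact hcur h

theorem pvSplit_nl (cs : List Char) : ∀ p ∈ PySem.Chars.splitOn cs ['\n'], '\n' ∉ p := by
  rw [PySem.Chars.splitOn]
  exact pvSplitGo_nl _ _ _ _ (by omega) (by simp) (by simp)

theorem pvRstrip_nl {cs : List Char} (h : '\n' ∉ cs) : '\n' ∉ PySem.Chars.rstrip cs := by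
  rw [PySem.Chars.rstrip]
  intro hm
  rw [List.mem_reverse] at hm
  have := (List.dropWhile_sublist _).mem hm
  rw [List.mem_reverse] at this
  exact h this

theorem pvLines_nl (text : String) :
    ∀ s ∈ ((PySem.Str.split? text "\n").getD []).map PySem.Str.rstrip, '\n' ∉ s.toList := by
  intro s hs
  rw [List.mem_map] at hs
  obtain ⟨t, ht, rfl⟩ := hs
  rw [PySem.Str.split?] at ht
  simp only [PySem.Chars.split?] at ht
  rw [if_neg (by simp)] at ht
  simp only [Option.map_some, Option.getD_some, List.mem_map] at ht
  obtain ⟨piece, hpiece, rfl⟩ := ht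
  rw [PySem.Str.toList_rstrip]
  apply pvRstrip_nl
  rw [String.toList_ofList]
  exact pvSplit_nl _ _ hpiece

theorem pvS1 (L : List (List Char)) (h : ∀ s ∈ L, '\n' ∉ s) :
    List.dropWhile (fun c => c == '\n') (PySem.Chars.join ['\n'] L)
    = PySem.Chars.join ['\n'] (L.dropWhile (·.isEmpty)) := by
  induction L with
  | nil => simp [PySem.Chars.join_nil]
  | cons a rest ih =>
    have ha := h a (by simp)
    have hrest : ∀ s ∈ rest, '\n' ∉ s := fun s hs => h s (List.mem_cons_of_mem _ hs)
    cases rest with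
    | nil =>
      rw [PySem.Chars.join_singleton]
      cases a with
      | nil => simp [PySem.Chars.join_nil]
      | cons c cs =>
        have hc : c ≠ '\n' := fun e => ha (e ▸ List.mem_cons_self)
        simp [hc, PySem.Chars.join_singleton]
    | cons b bs =>
      rw [PySem.Chars.join_cons_cons]
      cases a with
      | nil =>
        simp only [List.nil_append, List.singleton_append, List.dropWhile_cons]
        simp only [beq_self_eq_true, if_true]
        rw [ih hrest]
        simp [List.dropWhile_cons]
      | cons c cs =>
        have hc : c ≠ '\n' := fun e => ha (e ▸ List.mem_cons_self)
        simp [hc, PySem.Chars.join_cons_cons]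

theorem pvJoin_concat (M : List (List Char)) (y : List Char) (hM : M ≠ []) :
    PySem.Chars.join ['\n'] (M ++ [y]) = PySem.Chars.join ['\n'] M ++ '\n' :: y := by
  induction M with
  | nil => simp at hM
  | cons a as ih =>
    cases as with
    | nil => simp [PySem.Chars.join_cons_cons, PySem.Chars.join_singleton]
    | cons b bs =>
      have e : (a :: (b :: bs) ++ [y] : List (List Char)) = a :: b :: (bs ++ [y]) := rfl
      rw [e, PySem.Chars.join_cons_cons]
      have ih' := ih (by simp)
      rw [show (b :: bs ++ [y] : List (List Char)) = b :: (bs ++ [y]) from rfl] at ih'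
      rw [ih', PySem.Chars.join_cons_cons]
      simp

theorem pvS2 (L : List (List Char)) :
    (PySem.Chars.join ['\n'] L).reverse
    = PySem.Chars.join ['\n'] (L.reverse.map List.reverse) := by
  induction L with
  | nil => simp [PySem.Chars.join_nil]
  | cons a rest ih =>
    cases rest with
    | nil => simp [PySem.Chars.join_singleton]
    | cons b bs =>
      rw [PySem.Chars.join_cons_cons]
      simp only [List.reverse_append, List.reverse_cons]
      rw [List.map_append, List.map_singleton, pvJoin_concat _ _ (by simp)]
      rw [List.reverse_cons] at ih
      rw [ih]
      simp

theorem pvBlankComp : ((fun (l : List Char) => l.isEmpty) ∘ String.toList) = (fun (s : String) => s == "") := by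
  funext s
  simp only [Function.comp_apply]
  rw [Bool.eq_iff_iff]
  simp [List.isEmpty_iff, String.toList_eq_nil_iff]
theorem pvContainsNl : (fun c => List.contains ['\n'] c) = (fun c => c == '\n') := by
  funext c
  rw [Bool.eq_iff_iff]
  simp
theorem pvRevEmptyComp : ((fun (x : List Char) => x.isEmpty) ∘ List.reverse) = (fun (x : List Char) => x.isEmpty) := by
  funext l
  simp [Function.comp_apply]


theorem pvPop_concat (M : List String) (x : String) :
    pvPopTrailingBlanks (M ++ [x]) = if x = "" then pvPopTrailingBlanks M else M ++ [x] := by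
  cases M with
  | nil => rw [List.nil_append, pvPopTrailingBlanks]; simp [pvPopTrailingBlanks]
  | cons m ms =>
    have e : m :: (ms ++ [x]) = (m :: ms) ++ [x] := rfl
    rw [List.cons_append, pvPopTrailingBlanks]
    simp only [e, List.getLast_append, List.dropLast_concat]
    simp

theorem pvS3 (L : List String) :
    pvPopTrailingBlanks L = (L.reverse.dropWhile (· == "")).reverse := by
  induction L using List.reverseRecOn with
  | nil => simp [pvPopTrailingBlanks]
  | append_singleton M x ih =>
    rw [pvPop_concat, ih]
    by_cases hx : x = "" <;> simp [hx]

theorem pvTrim (L : List String) (h : ∀ s ∈ L, '\n' ∉ s.toList) :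
    PySem.Str.stripChars (PySem.Str.join "\n" L) "\n"
    = PySem.Str.join "\n" (pvPopTrailingBlanks (L.dropWhile (· == ""))) := by
  apply String.toList_inj.mp
  simp only [PySem.Str.toList_stripChars, PySem.Str.join, String.toList_ofList]
  rw [PySem.Chars.stripChars]
  rw [show (("\n" : String).toList) = ['\n'] from rfl, pvContainsNl]
  set M := L.dropWhile (· == "") with hM
  have hMnl : ∀ s ∈ M, '\n' ∉ s.toList := fun s hs => h s ((List.dropWhile_sublist _).mem hs)
  have hMtnl : ∀ t ∈ M.map String.toList, '\n' ∉ t := by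
    intro t ht
    obtain ⟨s, hs, rfl⟩ := List.mem_map.mp ht
    exact hMnl s hs
  have step1 : List.dropWhile (fun c => c == '\n') (PySem.Chars.join ['\n'] (L.map String.toList))
      = PySem.Chars.join ['\n'] (M.map String.toList) := by
    rw [pvS1 _ (by intro t ht; obtain ⟨s, hs, rfl⟩ := List.mem_map.mp ht; exact h s hs)]
    rw [List.dropWhile_map, pvBlankComp, hM]
  rw [step1, pvS2]
  rw [pvS1 _ (by
    intro t ht
    obtain ⟨u, hu, rfl⟩ := List.mem_map.mp ht
    rw [List.mem_reverse] at hu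
    simpa using hMtnl u hu)]
  have hidmap : (List.reverse ∘ List.reverse : List Char → List Char) = id := by
    funext l; simp
  rw [List.dropWhile_map, pvRevEmptyComp, pvS2, List.map_reverse, List.map_map, hidmap, List.map_id]
  -- right-hand side
  rw [pvS3]
  rw [← pvBlankComp, List.map_reverse, ← List.dropWhile_map, List.map_reverse]


-- ===== VERDICT (by name: the statement is the Claim_ definition above) =====
theorem clean_spacing_py_spec : Claim_equal_clean_spacing_py := by
  intro text _
  unfold Spec_clean_spacing_py clean_spacing_py clean_spacing_py_alt
  simp only []
  set lines := ((PySem.Str.split? text "\n").getD []).map PySem.Str.rstrip with hlines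
  have hA := pvFoldA lines 0 [] "x" "x" (fun _ => rfl)
    (fun h => absurd h (by decide)) (fun h _ => absurd h (by decide))
  have hB := pvFilterB lines lines [] rfl
  have hp1 : pvPrev lines 0 1 = "x" := rfl
  have hp2 : pvPrev lines 0 2 = "x" := rfl
  rw [List.length_nil] at hB
  rw [hp1, hp2] at hB
  rw [Nat.cast_zero] at hB
  rw [hA, hB, List.nil_append]
  have hnl : ∀ s ∈ pvCollapse "x" "x" lines, '\n' ∉ s.toList :=
    fun s hs => pvLines_nl text s (pvMem_pvCollapse hs)
  exact (pvTrim _ hnl).symm
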